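-- pv_equiv track=rewrite | github.com/50gramx/eapp-python-implementation | src/support/image_processing/utils.py | get_page_text
-- ===== SOURCE A (Python) =====
-- def get_page_text(results):
--     trailing_blanks_list = []
--     next_line = None
--     page_text = list()
--     # last_line = None
--     for i in range(0, len(results["text"])):
--         text = results["text"][i]
--         # conf = int(results["conf"][i])
--         text = "".join([c if ord(c) < 128 else "" for c in text]).strip()
--         # pp.pprint(fr'{text}')
--         if text != '' and len(trailing_blanks_list) == 0:
--             page_text.append(fr'{text}')
--             # pp.pprint(fr'{text}')
--         elif len(trailing_blanks_list) == 0: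
--             trailing_blanks_list.append(text)
--         elif len(trailing_blanks_list) > 0 and text == '':
--             trailing_blanks_list.append(text)
--         elif len(trailing_blanks_list) > 0 and text != '':
--             if len(trailing_blanks_list) == 1:
--                 page_text.append(fr'[SEP]')
--                 # pp.pprint(fr'[SEP]')
--             else:
--                 for trailing_blanks in trailing_blanks_list[:-2]:
--                     page_text.append(fr'{trailing_blanks}')
--                     # pp.pprint(fr'{trailing_blanks}')
--                 page_text.append(fr'[PARA]')
--                 page_text.append(fr'[SEP]')
--                 # pp.pprint(fr'[PARA]')
--                 # pp.pprint(fr'[SEP]')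
--             trailing_blanks_list = []
--             page_text.append(fr'{text}')
--             # pp.pprint(fr'{text}')
--     return ' '.join(page_text).replace('[SEP]', '\n\t').replace('[PARA]', '\t')
-- ===== SOURCE B (Python) =====
-- def get_page_text(results):
--     # stage 1: clean every token
--     cleaned = ["".join([c if ord(c) < 128 else "" for c in t]).strip()
--                for t in results["text"]]
--     # stage 2: trailing blanks are never rendered; drop them up front
--     while cleaned and cleaned[-1] == '':
--         cleaned.pop()
--     # stage 3: run-length scan — render each maximal blank run, copy words through
--     pieces = []
--     i = 0
--     n = len(cleaned)
--     while i < n: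
--         if cleaned[i] != '':
--             pieces.append(cleaned[i])
--             i += 1
--         else:
--             j = i + 1
--             while j < n and cleaned[j] == '':
--                 j += 1
--             k = j - i
--             if k == 1:
--                 pieces.append('[SEP]')
--             else:
--                 pieces += [''] * (k - 2) + ['[PARA]', '[SEP]']
--             i = j
--     return ' '.join(pieces).replace('[SEP]', '\n\t').replace('[PARA]', '\t')
-- ===== Notes on version B (the rewrite author's own statement) =====
-- stated objective: alternative
-- what changed: Replaces A's online four-branch state machine carrying a trailing-blanks list across iterations with three staged passes: clean all tokens, explicitly right-trim trailing blanks, then a run-length scanner that renders each maximal blank run as its separator pieces.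
import Mathlib
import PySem

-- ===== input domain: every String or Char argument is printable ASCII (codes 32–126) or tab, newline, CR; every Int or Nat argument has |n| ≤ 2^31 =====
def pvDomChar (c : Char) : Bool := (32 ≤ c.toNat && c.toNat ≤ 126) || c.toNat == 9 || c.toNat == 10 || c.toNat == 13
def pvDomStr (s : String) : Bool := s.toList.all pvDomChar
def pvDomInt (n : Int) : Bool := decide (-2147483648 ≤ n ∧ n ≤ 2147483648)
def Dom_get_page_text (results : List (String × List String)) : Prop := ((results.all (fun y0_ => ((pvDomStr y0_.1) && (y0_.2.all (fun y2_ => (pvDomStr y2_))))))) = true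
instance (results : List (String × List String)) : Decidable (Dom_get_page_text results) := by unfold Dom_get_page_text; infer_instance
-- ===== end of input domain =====

-- B replaces A's online four-branch state machine with three staged passes
-- (clean all, right-trim trailing blanks, run-length render); objective: alternative.

-- ===== PORT A =====
-- shared cleaning step, the identical line in both Pythons:
-- "".join([c if ord(c) < 128 else "" for c in text]).strip()
def pvClean (t : String) : String :=
  PySem.Str.strip (PySem.Str.join "" (t.toList.map (fun c => if c.toNat < 128 then String.ofList [c] else "")))

-- results["text"] (first-match lookup; Pre_ guarantees the key exists)
def pvTexts (results : List (String × List String)) : List String :=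
  ((PySem.Dict.mk results).get? "text").getD []

-- the shared return line ' '.join(...).replace('[SEP]','\n\t').replace('[PARA]','\t')
def pvFinish (page : List String) : String :=
  PySem.Str.replace (PySem.Str.replace (PySem.Str.join " " page) "[SEP]" "\n\t") "[PARA]" "\t"

-- A's four branches on the already-cleaned token; state = (trailing_blanks_list, page_text)
def pvStepA0 (st : List String × List String) (text : String) : List String × List String :=
  let tb := st.1
  let page := st.2
  if text ≠ "" ∧ tb.length = 0 then (tb, page ++ [text])
  else if tb.length = 0 then (tb ++ [text], page)
  else if tb.length > 0 ∧ text = "" then (tb ++ [text], page)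
  else if tb.length > 0 ∧ text ≠ "" then
    let page :=
      if tb.length = 1 then page ++ ["[SEP]"]
      else ((PySem.List.slice tb none (some (-2))).foldl (fun acc x => acc ++ [x]) page)
             ++ ["[PARA]"] ++ ["[SEP]"]
    ([], page ++ [text])
  else st

-- one iteration of A's for-loop body: clean, then branch
def pvStepA (st : List String × List String) (raw : String) : List String × List String :=
  pvStepA0 st (pvClean raw)

def get_page_text (results : List (String × List String)) : String :=
  pvFinish ((PySem.List.pyRange 0 (PySem.List.len (pvTexts results)) 1).foldl
    (fun st i => pvStepA st (PySem.List.pyGetD (pvTexts results) i "")) ([], [])).2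

-- ===== PORT B =====
-- B stage 2: while cleaned and cleaned[-1] == '': cleaned.pop()
def pvRtrim (l : List String) : List String :=
  if h : l.getLast? = some "" then pvRtrim l.dropLast else l
termination_by l.length
decreasing_by
  have hne : l ≠ [] := by intro he; subst he; simp at h
  cases l with
  | nil => exact absurd rfl hne
  | cons a as => simp [List.length_dropLast]

-- B stage 3: the run-length scanner (index loop over cleaned, inner run scan = takeWhile)
def pvRender (l : List String) : List String :=
  match l with
  | [] => []
  | t :: rest =>
    if t ≠ "" then t :: pvRender rest
    else
      let j := rest.takeWhile (fun s => s == "")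
      let k := j.length + 1
      (if k = 1 then ["[SEP]"] else List.replicate (k - 2) "" ++ ["[PARA]", "[SEP]"])
        ++ pvRender (rest.drop j.length)
termination_by l.length
decreasing_by
  · simp
  · simp only [List.length_cons, List.length_drop]
    omega

def get_page_text_alt (results : List (String × List String)) : String :=
  pvFinish (pvRender (pvRtrim ((pvTexts results).map pvClean)))

-- ===== PRECONDITION & SPEC =====
-- Pre_ excludes only inputs without a "text" key, on which Python A raises KeyError.
def Pre_get_page_text (results : List (String × List String)) : Prop :=
  ((PySem.Dict.mk results).get? "text").isSome = true
instance (results : List (String × List String)) : Decidable (Pre_get_page_text results) := by unfold Pre_get_page_text; infer_instance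
def pvWitness_get_page_text : (List (String × List String)) := [("text", ["hi", "", "", "yo"])]
def Spec_get_page_text (results : List (String × List String)) (out : String) : Prop := out = get_page_text_alt results
instance (results : List (String × List String)) (out : String) : Decidable (Spec_get_page_text results out) := by unfold Spec_get_page_text; infer_instance

-- ===== CLAIM (what is proved, stated in full; the proofs are below) =====
def Claim_equal_get_page_text : Prop := ∀ (results : List (String × List String)), Dom_get_page_text results → Pre_get_page_text results → Spec_get_page_text results (get_page_text results)

-- ===== LEMMAS AND PROOFS =====

-- what A/B emit for a run of n blanks followed by a word
def pvFlush (n : Nat) : List String :=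
  if n = 0 then [] else if n = 1 then ["[SEP]"]
  else List.replicate (n - 2) "" ++ ["[PARA]", "[SEP]"]

theorem pvRtrim_char (l : List String) :
    pvRtrim l = (l.reverse.dropWhile (fun s => s == "")).reverse := by
  fun_induction pvRtrim l with
  | case1 l h ih =>
      rcases List.eq_nil_or_concat l with he | ⟨l', a, he⟩
      · subst he; simp at h
      · subst he
        simp only [List.concat_eq_append] at *
        have ha : a = "" := by
          rw [List.getLast?_concat] at h; simpa using h
        subst ha
        rw [List.dropLast_concat] at ih
        rw [List.dropLast_concat, ih]
        simp
  | case2 l h =>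
      rcases List.eq_nil_or_concat l with he | ⟨l', a, he⟩
      · subst he; simp
      · subst he
        simp only [List.concat_eq_append] at *
        have ha : ¬ (a == "") = true := by
          intro hb
          exact h (by rw [List.getLast?_concat]; simpa using hb)
        rw [List.reverse_append]
        simp only [List.reverse_cons, List.reverse_nil, List.nil_append, List.singleton_append]
        rw [List.dropWhile_cons, if_neg ha]
        simp

theorem pvRtrim_replicate (n : Nat) : pvRtrim (List.replicate n ("" : String)) = [] := by
  rw [pvRtrim_char]
  simp

theorem pvRtrim_append (pre ts : List String) (t : String) (ht : t ≠ "") :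
    pvRtrim (pre ++ t :: ts) = pre ++ t :: pvRtrim ts := by
  rw [pvRtrim_char, pvRtrim_char]
  rw [List.reverse_append, List.reverse_cons, List.append_assoc, List.dropWhile_append]
  by_cases hz : ts.reverse.dropWhile (fun s => s == "") = []
  · simp [hz, ht]
  · simp [hz]

theorem pvTakeWhile_run (m : Nat) (t : String) (l : List String) (ht : t ≠ "") :
    (List.replicate m ("" : String) ++ t :: l).takeWhile (fun s => s == "")
      = List.replicate m "" := by
  induction m with
  | zero => simp [ht]
  | succ k ih => simp [List.replicate_succ, ih]

theorem pvRender_nil : pvRender [] = [] := by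
  rw [pvRender.eq_def]

theorem pvRender_cons_ne (t : String) (l : List String) (ht : t ≠ "") :
    pvRender (t :: l) = t :: pvRender l := by
  rw [pvRender.eq_def]; simp [ht]

theorem pvRender_cons_blank (rest : List String) :
    pvRender ("" :: rest) =
      (if (rest.takeWhile (fun s => s == "")).length + 1 = 1 then ["[SEP]"]
       else List.replicate ((rest.takeWhile (fun s => s == "")).length + 1 - 2) ""
              ++ ["[PARA]", "[SEP]"])
        ++ pvRender (rest.drop (rest.takeWhile (fun s => s == "")).length) := by
  rw [pvRender.eq_def]; simp

theorem pvRender_run (n : Nat) (t : String) (l : List String) (ht : t ≠ "") :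
    pvRender (List.replicate n "" ++ t :: l) = pvFlush n ++ t :: pvRender l := by
  cases n with
  | zero => simp [pvRender_cons_ne t l ht, pvFlush]
  | succ m =>
      rw [List.replicate_succ, List.cons_append, pvRender_cons_blank]
      rw [pvTakeWhile_run m t l ht]
      simp only [List.length_replicate]
      rw [List.drop_left' (by simp), pvRender_cons_ne t l ht]
      rcases m with _ | m' <;> simp [pvFlush]

theorem pvMain (ts : List String) : ∀ (n : Nat) (page : List String),
    (ts.foldl pvStepA0 (List.replicate n "", page)).2
      = page ++ pvRender (pvRtrim (List.replicate n "" ++ ts)) := by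
  induction ts with
  | nil =>
      intro n page
      simp [pvRtrim_replicate, pvRender_nil]
  | cons t ts ih =>
      intro n page
      by_cases ht : t = ""
      · subst ht
        have hst : pvStepA0 (List.replicate n "", page) ""
            = (List.replicate (n + 1) "", page) := by
          rcases n with _ | m <;> simp [pvStepA0, List.replicate_succ']
        rw [List.foldl_cons, hst, ih (n + 1) page]
        have : List.replicate n ("" : String) ++ "" :: ts
            = List.replicate (n + 1) "" ++ ts := by
          rw [List.replicate_succ']; simp
        rw [this]
      · have hst : pvStepA0 (List.replicate n "", page) t
            = ([], page ++ pvFlush n ++ [t]) := by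
          rcases n with _ | _ | m
          · simp [pvStepA0, ht, pvFlush]
          · simp [pvStepA0, ht, pvFlush]
          · have h2 : PySem.List.slice (List.replicate (m + 2) ("" : String)) none (some (-2))
                = List.replicate m "" := by
              rw [PySem.List.slice_to_neg_ofNat _ 2 (by omega)]
              simp [List.take_replicate]
            simp [pvStepA0, ht, h2, pvFlush, List.append_assoc]
        rw [List.foldl_cons, hst]
        have := ih 0 (page ++ pvFlush n ++ [t])
        simp only [List.replicate_zero, List.nil_append] at this
        rw [this, pvRtrim_append _ _ _ ht, pvRender_run _ _ _ ht]
        simp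

-- ===== VERDICT (by name: the statement is the Claim_ definition above) =====
theorem get_page_text_spec : Claim_equal_get_page_text := by
  intro results _ _
  unfold Spec_get_page_text get_page_text get_page_text_alt
  rw [PySem.List.foldl_pyRange_zero_pyGetD]
  rw [show (pvTexts results).foldl pvStepA ([], [])
        = ((pvTexts results).map pvClean).foldl pvStepA0 ([], []) by
      rw [List.foldl_map]; rfl]
  have := pvMain ((pvTexts results).map pvClean) 0 []
  simp only [List.replicate_zero, List.nil_append] at this
  rw [this]
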